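-- pv_equiv track=rewrite | github.com/jpenalozay/tesis2 | agentes/implementations/linter_agent.py | _generate_recommendations
-- ===== SOURCE A (Python) =====
-- from typing import Dict, Any, List
--
-- def _generate_recommendations(issues: List[Dict]) -> List[str]:
--     """Genera recomendaciones basadas en issues."""
--     recommendations = []
--
--     # Contar tipos de issues
--     error_count = sum(1 for i in issues if 'error' in i.get('message', '').lower())
--     warning_count = sum(1 for i in issues if 'warning' in i.get('message', '').lower())
--
--     if error_count > 0:
--         recommendations.append(f"Fix {error_count} errors")
--     if warning_count > 0:
--         recommendations.append(f"Address {warning_count} warnings")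
--
--     # Recomendaciones genéricas
--     if len(issues) > 10:
--         recommendations.append("Consider refactoring to improve code quality")
--     if any('type' in i.get('message', '').lower() for i in issues):
--         recommendations.append("Add type hints for better type safety")
--
--     return recommendations if recommendations else ["Code quality is good"]
-- ===== SOURCE B (Python) =====
-- def _generate_recommendations(issues):
--     """Table-driven: one keyword-count dict built in a single pass, then a uniform
--     rules table filtered by 'trigger > 0' (no if/append chain, no any())."""
--     counts = {'error': 0, 'warning': 0, 'type': 0}
--     for i in issues:
--         msg = i.get('message', '').lower()
--         for kw in counts:
--             counts[kw] += kw in msg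
--     rules = [
--         (counts['error'], "Fix {} errors".format(counts['error'])),
--         (counts['warning'], "Address {} warnings".format(counts['warning'])),
--         (len(issues) - 10, "Consider refactoring to improve code quality"),
--         (counts['type'], "Add type hints for better type safety"),
--     ]
--     recommendations = [text for trigger, text in rules if trigger > 0]
--     return recommendations or ["Code quality is good"]
-- ===== Notes on version B (the rewrite author's own statement) =====
-- stated objective: alternative
-- what changed: Replaces A's three separate scans plus an if/append chain by a keyword-count dictionary built in one pass and a declarative rules table (trigger, text) emitted through a uniform 'trigger > 0' filter; the any('type'...) test becomes a count, and the length test becomes len(issues)-10.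
import Mathlib
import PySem

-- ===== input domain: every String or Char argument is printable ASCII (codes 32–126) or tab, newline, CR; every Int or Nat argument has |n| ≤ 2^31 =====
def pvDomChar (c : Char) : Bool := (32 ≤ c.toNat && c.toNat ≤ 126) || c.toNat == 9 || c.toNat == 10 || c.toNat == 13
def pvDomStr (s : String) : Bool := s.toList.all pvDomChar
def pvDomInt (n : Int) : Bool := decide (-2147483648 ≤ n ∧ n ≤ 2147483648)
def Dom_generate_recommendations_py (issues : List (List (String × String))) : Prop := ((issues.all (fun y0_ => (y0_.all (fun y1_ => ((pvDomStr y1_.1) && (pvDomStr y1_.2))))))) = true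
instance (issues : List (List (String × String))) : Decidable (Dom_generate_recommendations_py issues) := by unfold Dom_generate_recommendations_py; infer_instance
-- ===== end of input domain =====

-- B is table-driven: one keyword-count dict built in a single pass, then a declarative rules
-- table filtered by a uniform 'trigger > 0'; objective: alternative decomposition, same output.

-- i.get('message', '').lower() — used by both programs character for character
def pvMsg (i : List (String × String)) : String :=
  PySem.Str.lower ((PySem.Dict.mk i).getD "message" "")

-- ===== PORT A =====
def generate_recommendations_py (issues : List (List (String × String))) : List String :=
  let error_count : Int :=
    (issues.map (fun i => if PySem.Str.isIn "error" (pvMsg i) then (1 : Int) else 0)).sum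
  let warning_count : Int :=
    (issues.map (fun i => if PySem.Str.isIn "warning" (pvMsg i) then (1 : Int) else 0)).sum
  let recs : List String := []
  let recs := if error_count > 0 then recs ++ ["Fix " ++ PySem.Int.toStr error_count ++ " errors"] else recs
  let recs := if warning_count > 0 then recs ++ ["Address " ++ PySem.Int.toStr warning_count ++ " warnings"] else recs
  let recs := if (issues.length : Int) > 10 then recs ++ ["Consider refactoring to improve code quality"] else recs
  let recs := if issues.any (fun i => PySem.Str.isIn "type" (pvMsg i)) then recs ++ ["Add type hints for better type safety"] else recs
  if recs.isEmpty then ["Code quality is good"] else recs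

-- ===== PORT B =====
-- inner loop: for kw in counts: counts[kw] += kw in msg   (keys are fixed, update in place)
def pvAltStep (d : PySem.Dict String Int) (i : List (String × String)) : PySem.Dict String Int :=
  let msg := pvMsg i
  d.keys.foldl (fun d' kw => d'.insert kw (d'.getD kw 0 + (if PySem.Str.isIn kw msg then 1 else 0))) d

def generate_recommendations_py_alt (issues : List (List (String × String))) : List String :=
  let counts := issues.foldl pvAltStep (PySem.Dict.ofList [("error", (0 : Int)), ("warning", 0), ("type", 0)])
  let rules : List (Int × String) :=
    [(counts.getD "error" 0, "Fix " ++ PySem.Int.toStr (counts.getD "error" 0) ++ " errors"),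
     (counts.getD "warning" 0, "Address " ++ PySem.Int.toStr (counts.getD "warning" 0) ++ " warnings"),
     ((issues.length : Int) - 10, "Consider refactoring to improve code quality"),
     (counts.getD "type" 0, "Add type hints for better type safety")]
  let recommendations := (rules.filter (fun r => decide (r.1 > 0))).map (·.2)
  if recommendations.isEmpty then ["Code quality is good"] else recommendations

-- ===== PRECONDITION & SPEC =====
def Spec_generate_recommendations_py (issues : List (List (String × String))) (out : List String) : Prop := out = generate_recommendations_py_alt issues
instance (issues : List (List (String × String))) (out : List String) : Decidable (Spec_generate_recommendations_py issues out) := by unfold Spec_generate_recommendations_py; infer_instance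

-- ===== CLAIM (what is proved, stated in full; the proofs are below) =====
def Claim_equal_generate_recommendations_py : Prop := ∀ (issues : List (List (String × String))), Dom_generate_recommendations_py issues → Spec_generate_recommendations_py issues (generate_recommendations_py issues)

-- ===== LEMMAS AND PROOFS =====

-- one step of B's loop on the (fixed-key) counts dict
theorem pv_step (a b c : Int) (i : List (String × String)) :
    pvAltStep (PySem.Dict.mk [("error", a), ("warning", b), ("type", c)]) i
    = PySem.Dict.mk
        [("error", a + (if PySem.Str.isIn "error" (pvMsg i) then 1 else 0)),
         ("warning", b + (if PySem.Str.isIn "warning" (pvMsg i) then 1 else 0)),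
         ("type", c + (if PySem.Str.isIn "type" (pvMsg i) then 1 else 0))] := by
  simp [pvAltStep, PySem.Dict.keys, PySem.Dict.insert, PySem.Dict.getD,
        PySem.Dict.get?, PySem.Dict.contains, List.foldl]

-- B's whole fold, relative to A's three independent sums/any
theorem pv_fold (issues : List (List (String × String))) (a b c : Int) :
    issues.foldl pvAltStep (PySem.Dict.mk [("error", a), ("warning", b), ("type", c)])
    = PySem.Dict.mk
        [("error", a + (issues.map (fun i => if PySem.Str.isIn "error" (pvMsg i) then (1 : Int) else 0)).sum),
         ("warning", b + (issues.map (fun i => if PySem.Str.isIn "warning" (pvMsg i) then (1 : Int) else 0)).sum),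
         ("type", c + (issues.map (fun i => if PySem.Str.isIn "type" (pvMsg i) then (1 : Int) else 0)).sum)] := by
  induction issues generalizing a b c with
  | nil => simp
  | cons i rest ih =>
    simp only [List.foldl_cons, pv_step, ih, List.map_cons, List.sum_cons]
    ring_nf

-- a 0/1 sum is positive iff some element satisfies the predicate
theorem pv_any_eq {α : Type} (p : α → Bool) (l : List α) :
    l.any p = decide (0 < (l.map (fun x => if p x then (1 : Int) else 0)).sum) := by
  induction l with
  | nil => simp
  | cons x xs ih =>
    have h0 : 0 ≤ (xs.map (fun x => if p x then (1 : Int) else 0)).sum := by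
      apply List.sum_nonneg; intro y hy
      simp only [List.mem_map] at hy
      obtain ⟨z, _, rfl⟩ := hy
      split <;> omega
    by_cases hx : p x = true
    · simp only [List.any_cons, hx, Bool.true_or, List.map_cons, List.sum_cons]
      have : (0:Int) < 1 + (xs.map (fun x => if p x then (1 : Int) else 0)).sum := by omega
      simp [this]
    · simp only [List.any_cons, hx, Bool.false_or, List.map_cons, List.sum_cons, ih]
      norm_num

-- getD on the literal three-key dict
theorem pv_getD_e (a b c : Int) :
    (PySem.Dict.mk [("error", a), ("warning", b), ("type", c)]).getD "error" 0 = a := by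
  simp [PySem.Dict.getD, PySem.Dict.get?, List.find?]
theorem pv_getD_w (a b c : Int) :
    (PySem.Dict.mk [("error", a), ("warning", b), ("type", c)]).getD "warning" 0 = b := by
  simp [PySem.Dict.getD, PySem.Dict.get?, List.find?]
theorem pv_getD_t (a b c : Int) :
    (PySem.Dict.mk [("error", a), ("warning", b), ("type", c)]).getD "type" 0 = c := by
  simp [PySem.Dict.getD, PySem.Dict.get?, List.find?]

-- ===== VERDICT (by name: the statement is the Claim_ definition above) =====
theorem generate_recommendations_py_spec : Claim_equal_generate_recommendations_py := by
  intro issues _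
  show generate_recommendations_py issues = generate_recommendations_py_alt issues
  unfold generate_recommendations_py generate_recommendations_py_alt
  rw [show PySem.Dict.ofList [("error", (0 : Int)), ("warning", 0), ("type", 0)]
        = PySem.Dict.mk [("error", (0 : Int)), ("warning", 0), ("type", 0)] from by decide,
      pv_fold, pv_any_eq (fun i => PySem.Str.isIn "type" (pvMsg i))]
  simp only [pv_getD_e, pv_getD_w, pv_getD_t, zero_add, gt_iff_lt]
  generalize (issues.map (fun i => if PySem.Str.isIn "error" (pvMsg i) then (1 : Int) else 0)).sum = E
  generalize (issues.map (fun i => if PySem.Str.isIn "warning" (pvMsg i) then (1 : Int) else 0)).sum = W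
  generalize (issues.map (fun i => if PySem.Str.isIn "type" (pvMsg i) then (1 : Int) else 0)).sum = T
  simp only [List.filter_cons, List.filter_nil, decide_eq_true_eq]
  split_ifs <;> first | rfl | (exfalso; omega) | simp_all
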